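-- pv_equiv track=rewrite | github.com/wfckl789/CS-6220 | A1/homework1.py | all_itemsets
-- ===== SOURCE A (Python) =====
-- def all_itemsets(unique_items, k):
--     result = []
--
--     def generate_combinations(cur_set, index):
--         if len(cur_set) == k:
--             result.append(cur_set.copy())
--             return
--
--         for i in range(index, len(unique_items)):
--             cur_set.append(unique_items[i])
--             generate_combinations(cur_set, i + 1)
--             cur_set.pop()
--
--     generate_combinations([], 0)
--     return result
-- ===== SOURCE B (Python) =====
-- def all_itemsets(unique_items, k):
--     # pick/skip structural recursion on the list (no index backtracking, no shared mutable state)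
--     def comb(items, k):
--         if k == 0:
--             return [[]]
--         if not items:
--             return []
--         head, rest = items[0], items[1:]
--         return [[head] + c for c in comb(rest, k - 1)] + comb(rest, k)
--     return comb(unique_items, k)
-- ===== Notes on version B (the rewrite author's own statement) =====
-- stated objective: simpler
-- what changed: Replaces index-based backtracking over a shared mutable cur_set with a direct pick/skip structural recursion on the list (head-included combinations mapped, then head-skipped combinations appended), producing the same lexicographic order.
import Mathlib
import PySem

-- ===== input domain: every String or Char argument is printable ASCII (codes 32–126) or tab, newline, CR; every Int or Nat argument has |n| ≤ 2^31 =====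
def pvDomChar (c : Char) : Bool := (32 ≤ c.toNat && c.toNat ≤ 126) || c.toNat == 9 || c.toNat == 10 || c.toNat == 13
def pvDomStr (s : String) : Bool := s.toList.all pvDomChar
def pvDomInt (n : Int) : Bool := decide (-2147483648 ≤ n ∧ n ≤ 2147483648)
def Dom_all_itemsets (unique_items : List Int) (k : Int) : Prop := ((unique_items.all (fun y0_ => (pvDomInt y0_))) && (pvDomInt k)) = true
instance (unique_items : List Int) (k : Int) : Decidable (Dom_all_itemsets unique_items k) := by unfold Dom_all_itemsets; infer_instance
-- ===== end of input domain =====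

-- B replaces A's index-based backtracking over a shared mutable cur_set with a
-- pick/skip structural recursion on the list (objective: simpler, same output order).


-- ===== PORT A =====
-- generate_combinations: the mutable `result` is the foldl accumulator; `cur_set.append/ pop`
-- around the recursive call is the argument `cur ++ [xs[i]]` of the call.
def genA (xs : List Int) (k : Int) (cur : List Int) (index : Nat) : List (List Int) :=
  if (cur.length : Int) = k then [cur]
  else (List.range' index (xs.length - index)).attach.foldl
        (fun acc i => acc ++ genA xs k (cur ++ [xs.getD i.1 0]) (i.1 + 1)) []
termination_by xs.length - index
decreasing_by
  have := List.mem_range'_1.mp i.2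
  omega

def all_itemsets (unique_items : List Int) (k : Int) : List (List Int) :=
  genA unique_items k [] 0

-- ===== PORT B =====
def combB (items : List Int) (k : Int) : List (List Int) :=
  if k = 0 then [[]]
  else match items with
    | [] => []
    | x :: rest => (combB rest (k - 1)).map (fun c => x :: c) ++ combB rest k

def all_itemsets_alt (unique_items : List Int) (k : Int) : List (List Int) :=
  combB unique_items k

-- ===== PRECONDITION & SPEC =====
def Spec_all_itemsets (unique_items : List Int) (k : Int) (out : List (List Int)) : Prop := out = all_itemsets_alt unique_items k
instance (unique_items : List Int) (k : Int) (out : List (List Int)) : Decidable (Spec_all_itemsets unique_items k out) := by unfold Spec_all_itemsets; infer_instance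

-- ===== CLAIM (what is proved, stated in full; the proofs are below) =====
def Claim_equal_all_itemsets : Prop := ∀ (unique_items : List Int) (k : Int), Dom_all_itemsets unique_items k → Spec_all_itemsets unique_items k (all_itemsets unique_items k)

-- ===== LEMMAS AND PROOFS =====

theorem foldl_attach_flatMap {α β : Type} (l : List α) (g : α → List β) :
    l.attach.foldl (fun acc i => acc ++ g i.1) [] = l.flatMap g := by
  rw [PySem.List.foldl_append_eq_flatMap]
  simp [List.flatMap]

theorem genA_flatMap (xs : List Int) (k : Int) (cur : List Int) (index : Nat)
    (h : ¬ ((cur.length : Int) = k)) :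
    genA xs k cur index
      = (List.range' index (xs.length - index)).flatMap
          (fun i => genA xs k (cur ++ [xs.getD i 0]) (i + 1)) := by
  rw [genA, if_neg h,
    foldl_attach_flatMap (List.range' index (xs.length - index))
      (fun i => genA xs k (cur ++ [xs.getD i 0]) (i + 1))]

theorem genA_eq (xs : List Int) (k : Int) :
    ∀ d index cur, xs.length - index = d →
      genA xs k cur index
        = (combB (xs.drop index) (k - cur.length)).map (fun c => cur ++ c) := by
  intro d
  induction d using Nat.strong_induction_on with
  | _ d ih =>
    intro index cur hd
    by_cases hk : (cur.length : Int) = k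
    · rw [genA, if_pos hk]
      have : k - (cur.length : Int) = 0 := by omega
      rw [this, combB.eq_def, if_pos rfl]
      simp
    · have hk0 : k - (cur.length : Int) ≠ 0 := by omega
      rw [genA_flatMap xs k cur index hk]
      by_cases hidx : index < xs.length
      · -- nonempty range
        have hd1 : xs.length - index = (xs.length - (index + 1)) + 1 := by omega
        rw [hd1, List.range'_succ]
        have hdrop : xs.drop index = xs.getD index 0 :: xs.drop (index + 1) := by
          rw [List.getD_eq_getElem _ _ hidx]
          exact (List.drop_eq_getElem_cons hidx)
        rw [List.flatMap_cons, hdrop, combB.eq_def, if_neg hk0]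
        have ih1 := ih (xs.length - (index + 1)) (by omega) (index + 1)
          (cur ++ [xs.getD index 0]) rfl
        have ih2 := ih (xs.length - (index + 1)) (by omega) (index + 1) cur rfl
        have hrest : (List.range' (index + 1) (xs.length - (index + 1))).flatMap
            (fun i => genA xs k (cur ++ [xs.getD i 0]) (i + 1))
            = genA xs k cur (index + 1) := by
          rw [genA_flatMap xs k cur (index + 1) hk]
        rw [hrest, ih1, ih2]
        simp only [List.length_append, List.length_cons, List.length_nil]
        have hcast : k - ((cur.length + 1 : Nat) : Int) = k - (cur.length : Int) - 1 := by
          push_cast; ring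
        rw [hcast]
        simp [List.map_map, Function.comp]
      · -- empty range: index ≥ length
        have h0 : xs.length - index = 0 := by omega
        rw [h0]
        have hdrop : xs.drop index = [] := List.drop_eq_nil_of_le (by omega)
        rw [hdrop, combB.eq_def, if_neg hk0]
        simp

-- ===== VERDICT (by name: the statement is the Claim_ definition above) =====
theorem all_itemsets_spec : Claim_equal_all_itemsets := by
  intro xs k _
  unfold Spec_all_itemsets all_itemsets all_itemsets_alt
  rw [genA_eq xs k (xs.length - 0) 0 [] rfl]
  simp
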